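-- pv_equiv track=rewrite | github.com/kierakel/comp110-21f-workspace | exercises/ex06/dictionaries.py | favorite_color
-- ===== SOURCE A (Python) =====
-- def favorite_color(colors: dict[str, str]) -> str:
--     """A function to identify the color appearing in a dictionary the most."""
--     favorite: list[str] = []
--     fav_color: str = ""
--     for key in colors:
--         if colors[key] in favorite:
--             fav_color = colors[key]
--         favorite.append(colors[key])
--     if fav_color not in favorite:
--         fav_color = favorite[0]
--     return fav_color
-- ===== SOURCE B (Python) =====
-- def favorite_color(colors: dict[str, str]) -> str:
--     """A function to identify the color appearing in a dictionary the most."""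
--     values = list(colors.values())
--     result = ""
--     for i, v in reversed(list(enumerate(values))):
--         if values.index(v) != i:
--             result = v
--             break
--     if result not in values:
--         result = values[0]
--     return result
-- ===== Notes on version B (the rewrite author's own statement) =====
-- stated objective: faster
-- what changed: B drops A's forward scan with a growing 'seen' list and running overwrite, and instead walks the value list backward returning the first value that is not its own first occurrence (values.index(v) != i) with an early break, keeping the same first-value fallback guard; on typical inputs the break fires near the end, so the quadratic membership scanning A always performs is avoided.
import Mathlib
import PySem

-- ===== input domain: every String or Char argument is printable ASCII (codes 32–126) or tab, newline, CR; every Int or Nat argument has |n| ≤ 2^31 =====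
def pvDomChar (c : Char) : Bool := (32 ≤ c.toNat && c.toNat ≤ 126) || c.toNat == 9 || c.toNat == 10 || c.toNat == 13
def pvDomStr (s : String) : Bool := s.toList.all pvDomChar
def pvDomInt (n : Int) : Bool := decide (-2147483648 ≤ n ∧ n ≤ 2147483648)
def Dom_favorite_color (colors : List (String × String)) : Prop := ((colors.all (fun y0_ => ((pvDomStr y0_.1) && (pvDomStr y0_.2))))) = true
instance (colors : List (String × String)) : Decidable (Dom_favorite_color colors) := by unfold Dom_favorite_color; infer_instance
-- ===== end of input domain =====

-- B replaces A's forward scan (growing 'seen' list + running overwrite) with a single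
-- backward walk that returns the first value which is not its own first occurrence (early exit);
-- same final first-value fallback. Objective: different decomposition, measurably faster via the early break.

-- ===== PORT A =====
-- A's loop body: favorite.append(colors[key]) after checking membership, overwriting fav_color.
def pvALoop (st : List String × String) (v : String) : List String × String :=
  (st.1 ++ [v], if v ∈ st.1 then v else st.2)

def favorite_color (colors : List (String × String)) : String :=
  let vals := (PySem.Dict.ofList colors).values
  let st := vals.foldl pvALoop ([], "")
  if st.2 ∈ st.1 then st.2 else (PySem.List.pyGet? st.1 0).getD ""  -- favorite[0]: IndexError (none) excluded by Pre_

-- ===== PORT B =====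
-- B's backward walk over reversed(list(enumerate(values))) with early break.
def pvBFind (values : List String) : List (Int × String) → String
  | [] => ""
  | (i, v) :: rest =>
      if (PySem.List.index? values v).map Int.ofNat ≠ some i then v
      else pvBFind values rest

def favorite_color_alt (colors : List (String × String)) : String :=
  let values := (PySem.Dict.ofList colors).values
  let result := pvBFind values (PySem.List.enumerate values 0).reverse
  if result ∈ values then result else (PySem.List.pyGet? values 0).getD ""  -- values[0]: IndexError (none) excluded by Pre_

-- ===== PRECONDITION & SPEC =====
-- Pre_ excludes only the empty dict, on which both Pythons raise IndexError at values[0]/favorite[0].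
def Pre_favorite_color (colors : List (String × String)) : Prop := colors ≠ []
instance (colors : List (String × String)) : Decidable (Pre_favorite_color colors) := by unfold Pre_favorite_color; infer_instance
def pvWitness_favorite_color : (List (String × String)) := [("ann", "red"), ("bob", "blue"), ("cyd", "red")]
def Spec_favorite_color (colors : List (String × String)) (out : String) : Prop := out = favorite_color_alt colors
instance (colors : List (String × String)) (out : String) : Decidable (Spec_favorite_color colors out) := by unfold Spec_favorite_color; infer_instance

-- ===== CLAIM (what is proved, stated in full; the proofs are below) =====
def Claim_equal_favorite_color : Prop := ∀ (colors : List (String × String)), Dom_favorite_color colors → Pre_favorite_color colors → Spec_favorite_color colors (favorite_color colors)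

-- ===== LEMMAS AND PROOFS =====

-- A's 'favorite' list is exactly the prefix of values consumed so far.
theorem pvALoop_fst (vals : List String) (pre : List String) (c : String) :
    (vals.foldl pvALoop (pre, c)).1 = pre ++ vals := by
  induction vals generalizing pre c with
  | nil => simp
  | cons x xs ih => simp [pvALoop, ih]

theorem pvEnumerate_append_singleton (l : List String) (x : String) (s : Int) :
    PySem.List.enumerate (l ++ [x]) s = PySem.List.enumerate l s ++ [(s + l.length, x)] := by
  induction l generalizing s with
  | nil => simp [PySem.List.enumerate_cons, PySem.List.enumerate_nil]
  | cons y ys ih =>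
      simp [PySem.List.enumerate_cons, ih]
      ring_nf

-- Appending a value at the end does not change index? of values already present,
-- hence not the backward walk over the old pairs.
theorem pvBFind_append (vals : List String) (x : String) (L : List (Int × String))
    (h : ∀ p ∈ L, p.2 ∈ vals) :
    pvBFind (vals ++ [x]) L = pvBFind vals L := by
  induction L with
  | nil => rfl
  | cons p rest ih =>
      obtain ⟨i, v⟩ := p
      have hv : v ∈ vals := h (i, v) (List.mem_cons_self ..)
      have hidx := PySem.List.index?_append_of_mem [x] hv
      simp only [pvBFind, hidx]
      rw [ih (fun q hq => h q (List.mem_cons_of_mem _ hq))]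

-- The heart: A's running overwrite equals B's backward first-hit.
theorem pvLoop_eq (vals : List String) :
    (vals.foldl pvALoop ([], "")).2 = pvBFind vals (PySem.List.enumerate vals 0).reverse := by
  induction vals using List.reverseRecOn with
  | nil => rfl
  | append_singleton vals x ih =>
      rw [List.foldl_append, pvEnumerate_append_singleton, List.reverse_append]
      have hmem : ∀ p ∈ (PySem.List.enumerate vals 0).reverse, p.2 ∈ vals := by
        intro p hp
        have h2 : p.2 ∈ (PySem.List.enumerate vals 0).map (·.2) :=
          List.mem_map_of_mem (List.mem_reverse.mp hp)
        rwa [PySem.List.map_snd_enumerate] at h2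
      have hfst : (List.foldl pvALoop ([], "") vals).1 = vals := by
        simpa using pvALoop_fst vals [] ""
      simp only [List.foldl_cons, List.foldl_nil, List.reverse_singleton,
        List.singleton_append, pvBFind, pvALoop, hfst]
      by_cases hx : x ∈ vals
      · have hidx := PySem.List.index?_append_of_mem [x] hx
        obtain ⟨k, hk⟩ := Option.isSome_iff_exists.mp ((PySem.List.index?_isSome_iff vals x).mpr hx)
        obtain ⟨hklt, -, -⟩ := PySem.List.getElem_of_index?_eq_some hk
        have hne : (PySem.List.index? (vals ++ [x]) x).map Int.ofNat ≠ some (0 + (vals.length : Int)) := by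
          rw [hidx, hk]
          simp only [Option.map_some, ne_eq, Option.some.injEq, Int.ofNat_eq_natCast]
          intro h
          omega
        rw [if_pos hne, if_pos hx]
      · have heq : (PySem.List.index? (vals ++ [x]) x).map Int.ofNat = some (0 + (vals.length : Int)) := by
          rw [PySem.List.index?_append_singleton_self (l := vals) (c := x) hx]
          simp
        rw [if_neg (not_not_intro heq), pvBFind_append vals x _ hmem, ih]
        exact if_neg hx

-- ===== VERDICT (by name: the statement is the Claim_ definition above) =====
theorem favorite_color_spec : Claim_equal_favorite_color := by
  intro colors _ _
  unfold Spec_favorite_color favorite_color favorite_color_alt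
  have h1 := pvALoop_fst (PySem.Dict.ofList colors).values [] ""
  simp only [List.nil_append] at h1
  simp only [h1, pvLoop_eq]
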